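-- pv_equiv track=rewrite | github.com/juanmc2005/SimilarityLearning | losses.py | batch_triplets
-- ===== SOURCE A (Python) =====
-- def batch_triplets(y, distance):
--     anchors, positives, negatives = [], [], []
--     for anchor, y_anchor in enumerate(y):
--         for positive, y_positive in enumerate(y):
--             # if same embedding or different labels, skip
--             if (anchor == positive) or (y_anchor != y_positive):
--                 continue
--             for negative, y_negative in enumerate(y):
--                 if y_negative == y_anchor:
--                     continue
--                 anchors.append(anchor)
--                 positives.append(positive)
--                 negatives.append(negative)
--     return anchors, positives, negatives
-- ===== SOURCE B (Python) =====
-- def batch_triplets(y, distance):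
--     # Group indices by label once, and cache per-label negative index lists,
--     # so the triple nested rescan of y disappears.
--     groups = {}
--     for i, label in enumerate(y):
--         groups.setdefault(label, []).append(i)
--     diffs = {}
--     for label in groups:
--         diffs[label] = [i for i, l in enumerate(y) if l != label]
--     anchors, positives, negatives = [], [], []
--     for anchor, label in enumerate(y):
--         same = groups[label]
--         neg = diffs[label]
--         k = len(neg)
--         for positive in same:
--             if positive != anchor:
--                 anchors.extend([anchor] * k)
--                 positives.extend([positive] * k)
--                 negatives.extend(neg)
--     return anchors, positives, negatives
-- ===== Notes on version B (the rewrite author's own statement) =====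
-- stated objective: faster
-- what changed: Replaces the triple nested rescan of y with a one-pass dict grouping indices by label plus a per-distinct-label cache of differently-labelled indices; triplet blocks are emitted with list-extend of precomputed lists instead of an innermost loop.
import Mathlib
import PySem

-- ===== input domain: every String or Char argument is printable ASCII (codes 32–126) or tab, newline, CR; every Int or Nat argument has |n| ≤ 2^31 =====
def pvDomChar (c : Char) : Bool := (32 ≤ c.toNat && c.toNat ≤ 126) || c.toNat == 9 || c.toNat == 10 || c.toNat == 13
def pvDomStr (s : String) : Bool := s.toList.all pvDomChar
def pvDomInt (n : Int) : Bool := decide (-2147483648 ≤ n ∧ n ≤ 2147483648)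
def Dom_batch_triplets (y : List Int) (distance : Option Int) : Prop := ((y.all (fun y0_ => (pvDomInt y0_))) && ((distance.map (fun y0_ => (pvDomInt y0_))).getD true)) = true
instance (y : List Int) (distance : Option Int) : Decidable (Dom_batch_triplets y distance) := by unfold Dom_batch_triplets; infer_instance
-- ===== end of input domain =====

-- B groups indices by label in one pass and caches per-label negative-index lists,
-- removing A's triple nested rescans of y (objective: faster; return values identical).

-- ===== PORT A =====
-- literal transliteration of A's three nested `for … in enumerate(y)` loops
def batch_triplets (y : List Int) (distance : Option Int) : List Int × List Int × List Int :=
  let en := PySem.List.enumerate y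
  en.foldl (fun acc ap =>
    en.foldl (fun acc pp =>
      if ap.1 = pp.1 ∨ ap.2 ≠ pp.2 then acc
      else en.foldl (fun acc np =>
        if np.2 = ap.2 then acc
        else (acc.1 ++ [ap.1], acc.2.1 ++ [pp.1], acc.2.2 ++ [np.1])) acc) acc) ([], [], [])

-- ===== PORT B =====
def batch_triplets_alt (y : List Int) (distance : Option Int) : List Int × List Int × List Int :=
  let en := PySem.List.enumerate y
  -- groups.setdefault(label, []).append(i)
  let groups := en.foldl (fun d p => d.modify p.2 [] (· ++ [p.1])) PySem.Dict.empty
  -- for label in groups: diffs[label] = [i for i, l in enumerate(y) if l != label]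
  let diffs := groups.keys.foldl
    (fun d l => d.insert l (en.filterMap (fun p => if p.2 ≠ l then some p.1 else none)))
    PySem.Dict.empty
  en.foldl (fun acc ap =>
    let same := groups.getD ap.2 []
    let neg := diffs.getD ap.2 []
    let k := neg.length
    same.foldl (fun acc p =>
      if p ≠ ap.1 then
        (acc.1 ++ List.replicate k ap.1, acc.2.1 ++ List.replicate k p, acc.2.2 ++ neg)
      else acc) acc) ([], [], [])

-- ===== PRECONDITION & SPEC =====
def Spec_batch_triplets (y : List Int) (distance : Option Int) (out : List Int × List Int × List Int) : Prop := out = batch_triplets_alt y distance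
instance (y : List Int) (distance : Option Int) (out : List Int × List Int × List Int) : Decidable (Spec_batch_triplets y distance out) := by unfold Spec_batch_triplets; infer_instance

-- ===== CLAIM (what is proved, stated in full; the proofs are below) =====
def Claim_equal_batch_triplets : Prop := ∀ (y : List Int) (distance : Option Int), Dom_batch_triplets y distance → Spec_batch_triplets y distance (batch_triplets y distance)

-- ===== LEMMAS AND PROOFS =====

-- negative-index list for label l
def pvNeg (en : List (Int × Int)) (l : Int) : List Int :=
  en.filterMap (fun p => if p.2 ≠ l then some p.1 else none)

-- A's innermost loop appends a block of |neg| copies of (anchor, positive) and the neg indices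
lemma pv_inner (en : List (Int × Int)) (la a p : Int) (acc : List Int × List Int × List Int) :
    en.foldl (fun acc np =>
      if np.2 = la then acc
      else (acc.1 ++ [a], acc.2.1 ++ [p], acc.2.2 ++ [np.1])) acc
    = (acc.1 ++ List.replicate (pvNeg en la).length a,
       acc.2.1 ++ List.replicate (pvNeg en la).length p,
       acc.2.2 ++ pvNeg en la) := by
  induction en generalizing acc with
  | nil => simp [pvNeg]
  | cons q en ih =>
    simp only [List.foldl_cons, pvNeg, List.filterMap_cons]
    by_cases h : q.2 = la
    · simp [h, ih acc, pvNeg]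
    · rw [if_neg h, ih]
      simp [pvNeg, h, List.replicate_succ, List.append_assoc]

-- groups lookup = indices carrying label l, in order
lemma pv_groups (y : List Int) (l : Int) :
    ((PySem.List.enumerate y).foldl (fun d p => d.modify p.2 [] (· ++ [p.1]))
        (PySem.Dict.empty : PySem.Dict Int (List Int))).getD l []
    = ((PySem.List.enumerate y).filter (fun p => p.2 == l)).map (·.1) := by
  have h : (PySem.List.enumerate y).foldl (fun d p => d.modify p.2 [] (· ++ [p.1]))
      (PySem.Dict.empty : PySem.Dict Int (List Int))
      = ((PySem.List.enumerate y).map Prod.swap).foldl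
          (fun d q => d.modify q.1 [] (· ++ [q.2])) PySem.Dict.empty := by
    rw [List.foldl_map]; rfl
  rw [h, PySem.Dict.getD_foldl_modify_append]
  simp [List.filter_map, List.map_map, Function.comp_def]

lemma pv_groups_keys (y : List Int) :
    ((PySem.List.enumerate y).foldl (fun d p => d.modify p.2 [] (· ++ [p.1]))
        (PySem.Dict.empty : PySem.Dict Int (List Int))).keys
    = PySem.Set.ofList y := by
  have h := PySem.Dict.keys_foldl_modify_key (PySem.List.enumerate y) (fun p => p.2)
    ([] : List Int) (fun _ p v => v ++ [p.1]) PySem.Dict.empty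
  simpa [PySem.List.map_snd_enumerate, PySem.Set.update_nil_left] using h

-- diffs lookup = pvNeg, for any label present in y
lemma pv_diffs (y : List Int) (l : Int) (hl : l ∈ y) :
    (((PySem.List.enumerate y).foldl (fun d p => d.modify p.2 [] (· ++ [p.1]))
        (PySem.Dict.empty : PySem.Dict Int (List Int))).keys.foldl
      (fun d l => d.insert l (pvNeg (PySem.List.enumerate y) l))
      (PySem.Dict.empty : PySem.Dict Int (List Int))).getD l []
    = pvNeg (PySem.List.enumerate y) l := by
  set ks := ((PySem.List.enumerate y).foldl (fun d p => d.modify p.2 [] (· ++ [p.1]))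
      (PySem.Dict.empty : PySem.Dict Int (List Int))).keys with hks
  have hnd : ks.Nodup := by
    rw [hks, pv_groups_keys]; exact PySem.Set.nodup_ofList y
  have hmem : l ∈ ks := by
    rw [hks, pv_groups_keys]; exact (PySem.Set.mem_ofList y l).2 hl
  have hitems : (ks.foldl (fun d l => d.insert l (pvNeg (PySem.List.enumerate y) l))
      (PySem.Dict.empty : PySem.Dict Int (List Int))).items
      = ks.map (fun l => (l, pvNeg (PySem.List.enumerate y) l)) := by
    simpa using PySem.Dict.items_foldl_insert_fresh ks id
      (fun l => pvNeg (PySem.List.enumerate y) l) PySem.Dict.empty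
      (fun a _ => PySem.Dict.contains_empty a) (by simpa using hnd)
  apply PySem.Dict.getD_of_mem_items
  · rw [hitems]; exact List.mem_map.2 ⟨l, hmem, rfl⟩
  · exact PySem.Dict.nodup_keys_foldl_insert _ _ _ (by simp)

-- A's middle loop over the full enumeration = B's loop over the same-label index list
lemma pv_mid (en : List (Int × Int)) (la a : Int)
    (g : List Int × List Int × List Int → Int → List Int × List Int × List Int)
    (acc : List Int × List Int × List Int) :
    en.foldl (fun acc pp => if a = pp.1 ∨ la ≠ pp.2 then acc else g acc pp.1) acc
    = ((en.filter (fun p => p.2 == la)).map (·.1)).foldl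
        (fun acc p => if p ≠ a then g acc p else acc) acc := by
  induction en generalizing acc with
  | nil => rfl
  | cons q en ih =>
    simp only [List.foldl_cons, List.filter_cons]
    by_cases h2 : q.2 = la
    · simp only [h2, beq_self_eq_true, if_true, List.map_cons, List.foldl_cons]
      by_cases h1 : a = q.1
      · rw [if_pos (Or.inl h1), if_neg (by simp [h1]), ih]
      · rw [if_neg (by simp [h1]), if_pos (fun h => h1 h.symm), ih]
    · rw [if_pos (Or.inr (fun h => h2 h.symm)), if_neg (by simp [h2]), ih]

theorem batch_triplets_spec : Claim_equal_batch_triplets := by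
  intro y distance _
  unfold Spec_batch_triplets batch_triplets batch_triplets_alt
  apply PySem.List.foldl_congr_mem
  intro acc ap hap
  have hlab : ap.2 ∈ y := by
    rcases (PySem.List.mem_enumerate_iff y 0 ap).1 hap with ⟨k, hk, hpk⟩
    subst hpk; exact List.getElem_mem hk
  have hd := pv_diffs y ap.2 hlab
  simp only [pvNeg] at hd
  rw [pv_groups, hd]
  refine (pv_mid (PySem.List.enumerate y) ap.2 ap.1
    (fun acc p => (PySem.List.enumerate y).foldl
      (fun acc np => if np.2 = ap.2 then acc
        else (acc.1 ++ [ap.1], acc.2.1 ++ [p], acc.2.2 ++ [np.1])) acc) acc).trans ?_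
  apply PySem.List.foldl_congr_mem
  intro acc p _
  have hi := pv_inner (PySem.List.enumerate y) ap.2 ap.1 p acc
  simp only [pvNeg] at hi
  by_cases h : p = ap.1 <;> simp [h, hi]
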